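-- pv_equiv track=rewrite | github.com/BioSensorsLab-Illinois/BSL-Laser-Project | .agent/skills/gpio-config/scripts/platforms/esp32.py | _categorize_pins
-- ===== SOURCE A (Python) =====
-- from typing import Any, Dict, List, Optional, Set
--
-- def _categorize_pins(
--     pins_list: List[Dict[str, Any]]
-- ) -> Dict[str, List[Dict[str, Any]]]:
--     """Categorize pins by protocol/function."""
--     categories = {
--         "i2c": [],
--         "spi": [],
--         "uart": [],
--         "pwm": [],
--         "onewire": [],
--         "adc": [],
--         "gpio_output": [],
--         "gpio_input": [],
--     }
--
--     for pin in pins_list: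
--         protocol = pin.get("protocol_bus", "").lower()
--         function = pin.get("function", "").upper()
--
--         if protocol == "i2c":
--             categories["i2c"].append(pin)
--         elif protocol == "spi":
--             categories["spi"].append(pin)
--         elif protocol == "uart":
--             categories["uart"].append(pin)
--         elif protocol == "pwm" or "PWM" in function:
--             categories["pwm"].append(pin)
--         elif protocol in ("1wire", "onewire") or "1-WIRE" in function:
--             categories["onewire"].append(pin)
--         elif protocol == "adc" or "ADC" in function:
--             categories["adc"].append(pin)
--         elif function == "OUTPUT":
--             categories["gpio_output"].append(pin)
--         elif function == "INPUT":
--             categories["gpio_input"].append(pin)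
--         elif protocol == "gpio":
--             categories["gpio_input"].append(pin)
--
--     return categories
-- ===== SOURCE B (Python) =====
-- from typing import Any, Dict, List
--
-- # Ordered rule table: (category, predicate on (lowercased protocol, uppercased function)),
-- # mirroring the elif precedence of the original.
-- _RULES = [
--     ("i2c", lambda p, f: p == "i2c"),
--     ("spi", lambda p, f: p == "spi"),
--     ("uart", lambda p, f: p == "uart"),
--     ("pwm", lambda p, f: p == "pwm" or "PWM" in f),
--     ("onewire", lambda p, f: p in ("1wire", "onewire") or "1-WIRE" in f),
--     ("adc", lambda p, f: p == "adc" or "ADC" in f),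
--     ("gpio_output", lambda p, f: f == "OUTPUT"),
--     ("gpio_input", lambda p, f: f == "INPUT" or p == "gpio"),
-- ]
--
--
-- def _key(pin):
--     protocol = pin.get("protocol_bus", "").lower()
--     function = pin.get("function", "").upper()
--     return next((k for k, pred in _RULES if pred(protocol, function)), None)
--
--
-- def _categorize_pins(
--     pins_list: List[Dict[str, Any]]
-- ) -> Dict[str, List[Dict[str, Any]]]:
--     """Categorize pins by protocol/function."""
--     return {k: [pin for pin in pins_list if _key(pin) == k] for k, _ in _RULES}
-- ===== Notes on version B (the rewrite author's own statement) =====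
-- stated objective: idiomatic
-- what changed: Replaces the single pass with an elif ladder appending into pre-built dict buckets by a data-driven ordered rule table: a classifier maps each pin to its first matching category, and the result is built as a dict comprehension filtering the pin list once per category.
import Mathlib
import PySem

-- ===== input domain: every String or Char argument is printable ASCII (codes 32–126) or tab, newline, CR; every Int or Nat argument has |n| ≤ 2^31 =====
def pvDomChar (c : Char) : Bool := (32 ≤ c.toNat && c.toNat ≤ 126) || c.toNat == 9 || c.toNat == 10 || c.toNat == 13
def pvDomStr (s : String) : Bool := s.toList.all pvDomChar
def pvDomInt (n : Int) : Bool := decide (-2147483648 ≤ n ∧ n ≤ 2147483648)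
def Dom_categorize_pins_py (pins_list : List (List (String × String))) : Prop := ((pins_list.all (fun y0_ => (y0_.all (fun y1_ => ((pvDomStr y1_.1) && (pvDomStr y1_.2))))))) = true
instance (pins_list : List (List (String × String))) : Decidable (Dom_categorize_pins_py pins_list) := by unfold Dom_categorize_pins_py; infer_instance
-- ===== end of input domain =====

-- B replaces A's elif ladder appending into dict buckets by an ordered rule table:
-- classify each pin to its first matching category, build the dict by filtering once per category (objective: idiomatic).

-- ===== PORT A =====
-- pin.get("protocol_bus", "").lower() / pin.get("function", "").upper()
def pvProto (pin : List (String × String)) : String :=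
  PySem.Str.lower ((PySem.Dict.mk pin).getD "protocol_bus" "")

def pvFunc (pin : List (String × String)) : String :=
  PySem.Str.upper ((PySem.Dict.mk pin).getD "function" "")

-- the loop body: categories[key].append(pin) = modify key ((· ++ [pin]))
def pvStep (categories : PySem.Dict String (List (List (String × String))))
    (pin : List (String × String)) : PySem.Dict String (List (List (String × String))) :=
  if pvProto pin == "i2c" then categories.modify "i2c" [] (· ++ [pin])
  else if pvProto pin == "spi" then categories.modify "spi" [] (· ++ [pin])
  else if pvProto pin == "uart" then categories.modify "uart" [] (· ++ [pin])
  else if pvProto pin == "pwm" || PySem.Str.isIn "PWM" (pvFunc pin) then categories.modify "pwm" [] (· ++ [pin])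
  else if (pvProto pin == "1wire" || pvProto pin == "onewire") || PySem.Str.isIn "1-WIRE" (pvFunc pin) then categories.modify "onewire" [] (· ++ [pin])
  else if pvProto pin == "adc" || PySem.Str.isIn "ADC" (pvFunc pin) then categories.modify "adc" [] (· ++ [pin])
  else if pvFunc pin == "OUTPUT" then categories.modify "gpio_output" [] (· ++ [pin])
  else if pvFunc pin == "INPUT" then categories.modify "gpio_input" [] (· ++ [pin])
  else if pvProto pin == "gpio" then categories.modify "gpio_input" [] (· ++ [pin])
  else categories

def categorize_pins_py (pins_list : List (List (String × String))) : List (String × List (List (String × String))) :=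
  let categories : PySem.Dict String (List (List (String × String))) :=
    PySem.Dict.ofList [("i2c", []), ("spi", []), ("uart", []), ("pwm", []),
                       ("onewire", []), ("adc", []), ("gpio_output", []), ("gpio_input", [])]
  (pins_list.foldl pvStep categories).items

-- ===== PORT B =====
def pvRules : List (String × (String → String → Bool)) :=
  [("i2c", fun p _ => p == "i2c"),
   ("spi", fun p _ => p == "spi"),
   ("uart", fun p _ => p == "uart"),
   ("pwm", fun p f => p == "pwm" || PySem.Str.isIn "PWM" f),
   ("onewire", fun p f => (p == "1wire" || p == "onewire") || PySem.Str.isIn "1-WIRE" f),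
   ("adc", fun p f => p == "adc" || PySem.Str.isIn "ADC" f),
   ("gpio_output", fun _ f => f == "OUTPUT"),
   ("gpio_input", fun p f => f == "INPUT" || p == "gpio")]

-- _key: first rule matching (protocol, function), None if no rule matches
def pvKey (pin : List (String × String)) : Option String :=
  (pvRules.find? (fun r => r.2 (pvProto pin) (pvFunc pin))).map (·.1)

def categorize_pins_py_alt (pins_list : List (List (String × String))) : List (String × List (List (String × String))) :=
  pvRules.map (fun r => (r.1, pins_list.filter (fun pin => pvKey pin == some r.1)))

-- ===== PRECONDITION & SPEC =====
def Spec_categorize_pins_py (pins_list : List (List (String × String))) (out : List (String × List (List (String × String)))) : Prop := out = categorize_pins_py_alt pins_list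
instance (pins_list : List (List (String × String))) (out : List (String × List (List (String × String)))) : Decidable (Spec_categorize_pins_py pins_list out) := by unfold Spec_categorize_pins_py; infer_instance

-- ===== CLAIM (what is proved, stated in full; the proofs are below) =====
def Claim_equal_categorize_pins_py : Prop := ∀ (pins_list : List (List (String × String))), Dom_categorize_pins_py pins_list → Spec_categorize_pins_py pins_list (categorize_pins_py pins_list)

-- ===== LEMMAS AND PROOFS =====
theorem pvMain (pins : List (List (String × String)))
    (a b c d e f g h : List (List (String × String))) :
    (pins.foldl pvStep (PySem.Dict.mk
      [("i2c", a), ("spi", b), ("uart", c), ("pwm", d),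
       ("onewire", e), ("adc", f), ("gpio_output", g), ("gpio_input", h)])).items
    = [("i2c", a ++ pins.filter (fun pin => pvKey pin == some "i2c")),
       ("spi", b ++ pins.filter (fun pin => pvKey pin == some "spi")),
       ("uart", c ++ pins.filter (fun pin => pvKey pin == some "uart")),
       ("pwm", d ++ pins.filter (fun pin => pvKey pin == some "pwm")),
       ("onewire", e ++ pins.filter (fun pin => pvKey pin == some "onewire")),
       ("adc", f ++ pins.filter (fun pin => pvKey pin == some "adc")),
       ("gpio_output", g ++ pins.filter (fun pin => pvKey pin == some "gpio_output")),
       ("gpio_input", h ++ pins.filter (fun pin => pvKey pin == some "gpio_input"))] := by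
  induction pins generalizing a b c d e f g h with
  | nil => simp [PySem.Dict.items]
  | cons pin rest ih =>
    simp only [List.foldl_cons, pvStep]
    split_ifs with h1 h2 h3 h4 h5 h6 h7 h8 h9
    · have hk : pvKey pin = some "i2c" := by
        simp only [pvKey, pvRules, List.find?, Option.map, Bool.true_or, Bool.false_or, Bool.or_false, Bool.or_true, *]
      simp [PySem.Dict.modify, PySem.Dict.getD, PySem.Dict.get?, PySem.Dict.insert,
        PySem.Dict.contains, ih, hk, List.filter_cons]
    · simp only [Bool.not_eq_true] at *
      have hk : pvKey pin = some "spi" := by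
        simp only [pvKey, pvRules, List.find?, Option.map, Bool.true_or, Bool.false_or, Bool.or_false, Bool.or_true, *]
      simp [PySem.Dict.modify, PySem.Dict.getD, PySem.Dict.get?, PySem.Dict.insert,
        PySem.Dict.contains, ih, hk, List.filter_cons]
    · simp only [Bool.not_eq_true] at *
      have hk : pvKey pin = some "uart" := by
        simp only [pvKey, pvRules, List.find?, Option.map, Bool.true_or, Bool.false_or, Bool.or_false, Bool.or_true, *]
      simp [PySem.Dict.modify, PySem.Dict.getD, PySem.Dict.get?, PySem.Dict.insert,
        PySem.Dict.contains, ih, hk, List.filter_cons]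
    · simp only [Bool.not_eq_true] at *
      have hk : pvKey pin = some "pwm" := by
        simp only [pvKey, pvRules, List.find?, Option.map, Bool.true_or, Bool.false_or, Bool.or_false, Bool.or_true, *]
      simp [PySem.Dict.modify, PySem.Dict.getD, PySem.Dict.get?, PySem.Dict.insert,
        PySem.Dict.contains, ih, hk, List.filter_cons]
    · simp only [Bool.not_eq_true] at *
      have hk : pvKey pin = some "onewire" := by
        simp only [pvKey, pvRules, List.find?, Option.map, Bool.true_or, Bool.false_or, Bool.or_false, Bool.or_true, *]
      simp [PySem.Dict.modify, PySem.Dict.getD, PySem.Dict.get?, PySem.Dict.insert,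
        PySem.Dict.contains, ih, hk, List.filter_cons]
    · simp only [Bool.not_eq_true] at *
      have hk : pvKey pin = some "adc" := by
        simp only [pvKey, pvRules, List.find?, Option.map, Bool.true_or, Bool.false_or, Bool.or_false, Bool.or_true, *]
      simp [PySem.Dict.modify, PySem.Dict.getD, PySem.Dict.get?, PySem.Dict.insert,
        PySem.Dict.contains, ih, hk, List.filter_cons]
    · simp only [Bool.not_eq_true] at *
      have hk : pvKey pin = some "gpio_output" := by
        simp only [pvKey, pvRules, List.find?, Option.map, Bool.true_or, Bool.false_or, Bool.or_false, Bool.or_true, *]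
      simp [PySem.Dict.modify, PySem.Dict.getD, PySem.Dict.get?, PySem.Dict.insert,
        PySem.Dict.contains, ih, hk, List.filter_cons]
    · simp only [Bool.not_eq_true] at *
      have hk : pvKey pin = some "gpio_input" := by
        simp only [pvKey, pvRules, List.find?, Option.map, Bool.true_or, Bool.false_or, Bool.or_false, Bool.or_true, *]
      simp [PySem.Dict.modify, PySem.Dict.getD, PySem.Dict.get?, PySem.Dict.insert,
        PySem.Dict.contains, ih, hk, List.filter_cons]
    · simp only [Bool.not_eq_true] at *
      have hk : pvKey pin = some "gpio_input" := by
        simp only [pvKey, pvRules, List.find?, Option.map, Bool.true_or, Bool.false_or, Bool.or_false, Bool.or_true, *]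
      simp [PySem.Dict.modify, PySem.Dict.getD, PySem.Dict.get?, PySem.Dict.insert,
        PySem.Dict.contains, ih, hk, List.filter_cons]
    · simp only [Bool.not_eq_true] at *
      have hk : pvKey pin = none := by
        simp only [pvKey, pvRules, List.find?, Option.map, Bool.true_or, Bool.false_or, Bool.or_false, Bool.or_true, *]
      rw [ih]
      simp [hk]
-- ===== VERDICT (by name: the statement is the Claim_ definition above) =====
theorem categorize_pins_py_spec : Claim_equal_categorize_pins_py := by
  intro pins _
  unfold Spec_categorize_pins_py categorize_pins_py categorize_pins_py_alt
  have : PySem.Dict.ofList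
      [("i2c", ([] : List (List (String × String)))), ("spi", []), ("uart", []), ("pwm", []),
       ("onewire", []), ("adc", []), ("gpio_output", []), ("gpio_input", [])]
    = PySem.Dict.mk [("i2c", []), ("spi", []), ("uart", []), ("pwm", []),
       ("onewire", []), ("adc", []), ("gpio_output", []), ("gpio_input", [])] := by decide
  simp only [this, pvMain, pvRules, List.map, List.nil_append]
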